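-- pv_equiv track=rewrite | github.com/ammoun/codechallenge_extra | redundantletters.py | spaceOutPunct
-- ===== SOURCE A (Python) =====
-- import string
--
-- def spaceOutPunct(str):
-- 	spaced = ""
-- 	i = 0
-- 	while i < len(str):
-- 		if (i<len(str) -1) and (not str[i] in string.punctuation and str[i+1] in string.punctuation or str[i] in string.punctuation and not str[i+1] in string.punctuation):
-- 			spaced += str[i]+ " "
-- 			i+=1
-- 		else:
-- 			spaced += str[i]
-- 			i+=1
-- 	return spaced
-- ===== SOURCE B (Python) =====
-- import string
-- from itertools import groupby
--
-- def spaceOutPunct(str):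
--     return ' '.join(''.join(g) for _, g in groupby(str, key=lambda c: c in string.punctuation))
-- ===== Notes on version B (the rewrite author's own statement) =====
-- stated objective: idiomatic
-- what changed: Replaces the index-based while loop that checks each boundary and grows the result by string concatenation with itertools.groupby over the punctuation-class key, joining the runs with a single join.
import Mathlib
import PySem

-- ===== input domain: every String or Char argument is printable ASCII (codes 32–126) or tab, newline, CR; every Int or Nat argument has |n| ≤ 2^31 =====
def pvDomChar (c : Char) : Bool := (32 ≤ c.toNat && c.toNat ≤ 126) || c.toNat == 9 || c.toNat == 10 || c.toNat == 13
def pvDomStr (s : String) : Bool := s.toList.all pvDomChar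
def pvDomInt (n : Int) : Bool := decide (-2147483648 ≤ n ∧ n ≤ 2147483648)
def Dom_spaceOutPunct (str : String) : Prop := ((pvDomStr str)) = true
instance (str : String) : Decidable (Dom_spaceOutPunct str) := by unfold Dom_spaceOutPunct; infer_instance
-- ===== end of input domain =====

-- B replaces the index-and-boundary while loop by grouping the string into
-- punctuation/non-punctuation runs and joining the runs with single spaces (idiomatic).

-- shared helper: `c in string.punctuation` for a single character
def isP (c : Char) : Bool := "!\"#$%&'()*+,-./:;<=>?@[\\]^_`{|}~".toList.contains c

-- ===== PORT A =====
-- literal port of A's while loop: index i, accumulator `spaced`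
def loopA (cs : List Char) (i : Nat) (spaced : List Char) : List Char :=
  if i < cs.length then
    if decide (i < cs.length - 1) &&
        ((!isP (cs.getD i ' ') && isP (cs.getD (i+1) ' ')) ||
         (isP (cs.getD i ' ') && !isP (cs.getD (i+1) ' '))) then
      loopA cs (i+1) (spaced ++ [cs.getD i ' ', ' '])
    else
      loopA cs (i+1) (spaced ++ [cs.getD i ' '])
  else spaced
termination_by cs.length - i

def spaceOutPunct (str : String) : String := String.mk (loopA str.toList 0 [])

-- ===== PORT B =====
-- itertools.groupby: split into maximal runs of equal punctuation-class
def groupRuns : List Char → List (List Char)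
  | [] => []
  | [c] => [[c]]
  | c :: d :: rest =>
      let gs := groupRuns (d :: rest)
      if isP c == isP d then (c :: gs.headD []) :: gs.tail else [c] :: gs

def spaceOutPunct_alt (str : String) : String :=
  String.mk (List.intercalate [' '] (groupRuns str.toList))

-- ===== PRECONDITION & SPEC =====
def Spec_spaceOutPunct (str : String) (out : String) : Prop := out = spaceOutPunct_alt str
instance (str : String) (out : String) : Decidable (Spec_spaceOutPunct str out) := by unfold Spec_spaceOutPunct; infer_instance

-- ===== CLAIM (what is proved, stated in full; the proofs are below) =====
def Claim_equal_spaceOutPunct : Prop := ∀ (str : String), Dom_spaceOutPunct str → Spec_spaceOutPunct str (spaceOutPunct str)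

-- ===== LEMMAS AND PROOFS =====

-- direct structural characterisation of A's loop
def emitA : List Char → List Char
  | [] => []
  | [c] => [c]
  | c :: d :: rest =>
      if isP c != isP d then c :: ' ' :: emitA (d :: rest) else c :: emitA (d :: rest)

lemma loopA_eq (cs : List Char) : ∀ i acc, loopA cs i acc = acc ++ emitA (cs.drop i) := by
  intro i
  induction' hn : cs.length - i using Nat.strong_induction_on with n ih generalizing i
  intro acc
  rw [loopA]
  by_cases hi : i < cs.length
  · have hdrop : cs.drop i = cs[i] :: cs.drop (i+1) := List.drop_eq_getElem_cons hi
    have hgd : cs.getD i ' ' = cs[i] := List.getD_eq_getElem cs ' ' hi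
    have hrec : ∀ acc', loopA cs (i+1) acc' = acc' ++ emitA (cs.drop (i+1)) := by
      intro acc'
      exact ih (cs.length - (i+1)) (by omega) (i+1) rfl acc'
    by_cases hlt : i < cs.length - 1
    · have hi1 : i + 1 < cs.length := by omega
      have hdrop1 : cs.drop (i+1) = cs[i+1] :: cs.drop (i+2) := List.drop_eq_getElem_cons hi1
      have hgd1 : cs.getD (i+1) ' ' = cs[i+1] := List.getD_eq_getElem cs ' ' hi1
      simp only [hi, if_pos, hgd, hgd1, decide_eq_true hlt, Bool.true_and]
      have hxor : ∀ a b : Bool, ((!a && b) || (a && !b)) = (a != b) := by decide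
      rw [hxor]
      by_cases hx : (isP cs[i] != isP cs[i+1]) = true
      · rw [if_pos hx, hrec, hdrop, hdrop1, emitA, ← hdrop1, if_pos hx]
        simp
      · rw [if_neg hx, hrec, hdrop, hdrop1, emitA, ← hdrop1, if_neg hx]
        simp
    · have hdrop1 : cs.drop (i+1) = [] := by
        apply List.drop_eq_nil_of_le; omega
      simp only [hi, if_pos, decide_eq_false hlt, Bool.false_and, if_neg, Bool.false_eq_true,
        not_false_iff, hrec, hdrop, hdrop1, hgd]
      rw [show emitA [cs[i]] = [cs[i]] from rfl]
      simp [emitA]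
  · have : cs.drop i = [] := by
      apply List.drop_eq_nil_of_le; omega
    simp [hi, this, emitA]

-- groupRuns of a nonempty list starts with its head
lemma groupRuns_head (c : Char) (rest : List Char) :
    ∃ t gs, groupRuns (c :: rest) = (c :: t) :: gs := by
  cases rest with
  | nil => exact ⟨[], [], rfl⟩
  | cons d r =>
    rw [groupRuns]
    obtain ⟨t, gs, h⟩ := groupRuns_head d r
    by_cases hc : isP c == isP d
    · exact ⟨d :: t, gs, by simp [hc, h]⟩
    · exact ⟨[], (d :: t) :: gs, by simp [hc, h]⟩

lemma emitA_eq_intercalate : ∀ cs : List Char, emitA cs = List.intercalate [' '] (groupRuns cs)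
  | [] => by simp [emitA, groupRuns, List.intercalate]
  | [c] => by simp [emitA, groupRuns, List.intercalate]
  | c :: d :: rest => by
    have ih := emitA_eq_intercalate (d :: rest)
    obtain ⟨t, gs, hg⟩ := groupRuns_head d rest
    rw [emitA, groupRuns]
    by_cases hc : isP c == isP d
    · have hx : (isP c != isP d) = false := by
        cases h1 : isP c <;> cases h2 : isP d <;> simp_all
      rw [hx]
      simp only [hc, if_pos, hg, List.headD_cons, List.tail_cons]
      rw [ih, hg]
      cases gs with
      | nil => simp [List.intercalate]
      | cons g gs' => simp [List.intercalate, List.intersperse]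
    · have hx : (isP c != isP d) = true := by
        cases h1 : isP c <;> cases h2 : isP d <;> simp_all
      rw [hx]
      simp only [hc, if_neg, Bool.false_eq_true, not_false_iff, if_true]
      rw [ih, hg]
      simp [List.intercalate, List.intersperse]

-- ===== VERDICT (by name: the statement is the Claim_ definition above) =====
theorem spaceOutPunct_spec : Claim_equal_spaceOutPunct := by
  intro s _
  unfold Spec_spaceOutPunct spaceOutPunct spaceOutPunct_alt
  rw [loopA_eq s.toList 0 [], List.drop_zero, List.nil_append, emitA_eq_intercalate]
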